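-- pv_equiv track=rewrite | github.com/JisuuungKim/artlog | ai/app/graph/run_feedback_analysis.py | _split_into_three_chunks
-- ===== SOURCE A (Python) =====
-- def _split_into_three_chunks(text: str) -> list[str]:
--     lines = [line for line in text.splitlines() if line.strip()]
--     if not lines:
--         return []
--
--     chunk_count = min(3, len(lines))
--     base_size, remainder = divmod(len(lines), chunk_count)
--
--     chunks: list[str] = []
--     start = 0
--     for idx in range(chunk_count):
--         size = base_size + (1 if idx < remainder else 0)
--         end = start + size
--         chunk_lines = lines[start:end]
--         if chunk_lines:
--             chunks.append("\n".join(chunk_lines))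
--         start = end
--
--     return chunks
-- ===== SOURCE B (Python) =====
-- def _chunk(ls, k):
--     if k == 1:
--         return ["\n".join(ls)]
--     head = (len(ls) + k - 1) // k
--     return ["\n".join(ls[:head])] + _chunk(ls[head:], k - 1)
--
--
-- def _split_into_three_chunks(text: str) -> list[str]:
--     lines = [line for line in text.splitlines() if line.strip()]
--     if not lines:
--         return []
--     return _chunk(lines, min(3, len(lines)))
-- ===== Notes on version B (the rewrite author's own statement) =====
-- stated objective: alternative
-- what changed: Replaces A's single accumulator loop over precomputed divmod sizes by a recursive greedy splitter: peel off a ceil(len/k)-sized head chunk and recurse on the tail with k-1 chunks (correct because greedy ceiling division puts the remainder on the first chunks, exactly A's remainder-first distribution).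
import Mathlib
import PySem

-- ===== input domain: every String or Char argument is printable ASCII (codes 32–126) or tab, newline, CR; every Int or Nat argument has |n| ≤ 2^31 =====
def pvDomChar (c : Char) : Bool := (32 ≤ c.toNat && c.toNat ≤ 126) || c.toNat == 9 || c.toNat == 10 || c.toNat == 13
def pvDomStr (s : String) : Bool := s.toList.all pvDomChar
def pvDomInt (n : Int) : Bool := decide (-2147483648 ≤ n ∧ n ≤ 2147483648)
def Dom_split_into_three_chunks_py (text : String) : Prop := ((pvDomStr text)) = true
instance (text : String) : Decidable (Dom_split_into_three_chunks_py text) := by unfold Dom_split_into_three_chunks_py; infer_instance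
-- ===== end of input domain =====

-- B replaces A's accumulator loop over precomputed divmod sizes by a recursive greedy splitter
-- (peel a ceil(len/k)-sized head chunk, recurse with k-1); objective: alternative decomposition.

-- ===== PORT A =====
def split_into_three_chunks_py (text : String) : List String :=
  let lines := (PySem.Str.splitlines text).filter (fun line => PySem.Str.strip line ≠ "")
  if lines.isEmpty then []
  else
    let chunk_count : Int := min 3 (lines.length : Int)
    let base_size : Int := PySem.Int.floordiv (lines.length : Int) chunk_count
    let remainder : Int := PySem.Int.mod (lines.length : Int) chunk_count
    let res := (PySem.List.pyRange 0 chunk_count 1).foldl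
      (fun (st : List String × Int) idx =>
        let size := base_size + (if idx < remainder then (1 : Int) else 0)
        let e := st.2 + size
        let chunk_lines := PySem.List.slice lines (some st.2) (some e)
        (if !chunk_lines.isEmpty then st.1 ++ [PySem.Str.join "\n" chunk_lines] else st.1, e))
      ([], 0)
    res.1

-- ===== PORT B =====
-- helper _chunk of Source B; the Python k is a positive int, recursion is on k (k-1 each call);
-- the k = 0 branch is unreachable (every call has k ≥ 1) and only makes the recursion structural
def pvChunk (ls : List String) : Nat → List String
  | 0 => []
  | 1 => [PySem.Str.join "\n" ls]
  | (k + 2) =>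
    let head : Int := PySem.Int.floordiv ((ls.length : Int) + ((k : Int) + 2) - 1) ((k : Int) + 2)
    PySem.Str.join "\n" (PySem.List.slice ls none (some head)) ::
      pvChunk (PySem.List.slice ls (some head) none) (k + 1)

def split_into_three_chunks_py_alt (text : String) : List String :=
  let lines := (PySem.Str.splitlines text).filter (fun line => PySem.Str.strip line ≠ "")
  if lines.isEmpty then []
  else pvChunk lines (min 3 lines.length)

-- ===== PRECONDITION & SPEC =====
def Spec_split_into_three_chunks_py (text : String) (out : List String) : Prop := out = split_into_three_chunks_py_alt text
instance (text : String) (out : List String) : Decidable (Spec_split_into_three_chunks_py text out) := by unfold Spec_split_into_three_chunks_py; infer_instance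

-- ===== CLAIM (what is proved, stated in full; the proofs are below) =====
def Claim_equal_split_into_three_chunks_py : Prop := ∀ (text : String), Dom_split_into_three_chunks_py text → Spec_split_into_three_chunks_py text (split_into_three_chunks_py text)

-- ===== LEMMAS AND PROOFS =====

-- the common line-filtering prefix of both ports, and A's chunking body, named so the
-- equivalence can be proved once over an arbitrary `lines` list
def pvLines (text : String) : List String :=
  (PySem.Str.splitlines text).filter (fun line => PySem.Str.strip line ≠ "")

def pvA (lines : List String) : List String :=
  ((PySem.List.pyRange 0 (min 3 (lines.length : Int)) 1).foldl
    (fun (st : List String × Int) idx =>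
      let size := PySem.Int.floordiv (lines.length : Int) (min 3 (lines.length : Int)) +
        (if idx < PySem.Int.mod (lines.length : Int) (min 3 (lines.length : Int)) then (1 : Int) else 0)
      let e := st.2 + size
      let chunk_lines := PySem.List.slice lines (some st.2) (some e)
      (if !chunk_lines.isEmpty then st.1 ++ [PySem.Str.join "\n" chunk_lines] else st.1, e))
    ([], 0)).1

-- a slice with in-range, nonempty bounds is a nonempty list
lemma pv_slice_some_ne (lines : List String) {a e : Int} (h0 : 0 ≤ a) (hae : a < e)
    (hl : a < (lines.length : Int)) : PySem.List.slice lines (some a) (some e) ≠ [] := by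
  rw [PySem.List.slice_toNat lines h0 (by omega)]
  simp only [ne_eq, List.eq_nil_iff_length_eq_zero, List.length_take, List.length_drop]
  omega

lemma pv_slice_none_ne (lines : List String) {e : Int} (h1 : 1 ≤ e) (hl : 0 < lines.length) :
    PySem.List.slice lines none (some e) ≠ [] := by
  rw [PySem.List.slice_to lines (by omega : (0:Int) ≤ e)]
  simp only [ne_eq, List.eq_nil_iff_length_eq_zero, List.length_take]
  omega

-- unfolding equations for pvChunk
lemma pvChunk_one (ls : List String) : pvChunk ls 1 = [PySem.Str.join "\n" ls] := rfl

lemma pvChunk_succ2 (ls : List String) (k : Nat) :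
    pvChunk ls (k + 2) =
      PySem.Str.join "\n" (PySem.List.slice ls none
        (some (PySem.Int.floordiv ((ls.length : Int) + ((k : Int) + 2) - 1) ((k : Int) + 2)))) ::
      pvChunk (PySem.List.slice ls
        (some (PySem.Int.floordiv ((ls.length : Int) + ((k : Int) + 2) - 1) ((k : Int) + 2))) none)
        (k + 1) := rfl

-- the three-chunk case: A's three loop iterations produce exactly B's greedy head splits
lemma pv_core (lines : List String) (h3 : 3 ≤ lines.length) :
    pvA lines = pvChunk lines 3 := by
  have hn3 : 3 ≤ (lines.length : Int) := by exact_mod_cast h3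
  have hmin : min 3 (lines.length : Int) = 3 := by omega
  have hrange : PySem.List.pyRange 0 3 1 = [0, 1, 2] := by decide
  obtain ⟨b, r, hrel, hb1, hrhi⟩ :
      ∃ b r : Nat, lines.length = 3 * b + r ∧ 1 ≤ b ∧ r < 3 :=
    ⟨lines.length / 3, lines.length % 3, by omega, by omega, by omega⟩
  have hfd : PySem.Int.floordiv (lines.length : Int) 3 = (b : Int) := by
    rw [PySem.Int.floordiv_eq_ediv_of_pos (by omega)]; omega
  have hmd : PySem.Int.mod (lines.length : Int) 3 = (r : Int) := by
    rw [PySem.Int.mod_eq_emod_of_pos (by omega)]; omega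
  unfold pvA
  rw [hmin, hfd, hmd, hrange, pvChunk_succ2, pvChunk_succ2, pvChunk_one]
  have hne : lines ≠ [] := by intro e; simp [e] at h3
  rcases (show r = 0 ∨ r = 1 ∨ r = 2 by omega) with h | h | h <;> subst h <;>
    norm_num [List.foldl]
  · -- r = 0 : chunks of sizes b, b, b
    have hb0 : ¬ b = 0 := by omega
    have hlen : (lines.length : Int) = 3 * (b : Int) := by exact_mod_cast hrel
    have h2 : PySem.List.slice lines (some (b:Int)) (some ((b:Int)+(b:Int))) ≠ [] :=
      pv_slice_some_ne _ (by omega) (by omega) (by omega)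
    have h3' : PySem.List.slice lines (some ((b:Int)+(b:Int))) (some ((b:Int)+(b:Int)+(b:Int))) ≠ [] :=
      pv_slice_some_ne _ (by omega) (by omega) (by omega)
    have hh1 : ((lines.length : Int) + 3 - 1) / 3 = ((b : Nat) : Int) := by omega
    rw [hh1, PySem.List.slice_from_natCast, PySem.List.slice_to_natCast]
    have hh2 : (((List.drop b lines).length : Int) + 2 - 1) / 2 = ((b : Nat) : Int) := by
      simp only [List.length_drop]; omega
    rw [hh2]
    simp only [h2, h3', hb0, hne, if_neg, not_false_iff, and_self, if_true]
    rw [PySem.List.slice_natCast_add, PySem.List.slice_to_natCast, PySem.List.slice_from_natCast,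
      List.drop_drop]
    rw [show (b : Int) + (b : Int) = (((b + b) : Nat) : Int) by push_cast; ring]
    rw [PySem.List.slice_natCast_add]
    rw [List.take_of_length_le (l := List.drop (b + b) lines) (by simp; omega)]
    simp
  · -- r = 1 : chunks of sizes b+1, b, b
    have hlen : (lines.length : Int) = 3 * (b : Int) + 1 := by exact_mod_cast hrel
    rw [show (b : Int) + 1 = (((b + 1) : Nat) : Int) by push_cast; ring]
    have h1 : PySem.List.slice lines none (some (((b+1) : Nat) : Int)) ≠ [] :=
      pv_slice_none_ne _ (by push_cast; omega) (by omega)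
    have h2 : PySem.List.slice lines (some (((b+1):Nat):Int)) (some ((((b+1):Nat):Int)+(b:Int))) ≠ [] :=
      pv_slice_some_ne _ (by push_cast; omega) (by push_cast; omega) (by push_cast; omega)
    have h3' : PySem.List.slice lines (some ((((b+1):Nat):Int)+(b:Int)))
        (some ((((b+1):Nat):Int)+(b:Int)+(b:Int))) ≠ [] :=
      pv_slice_some_ne _ (by push_cast; omega) (by push_cast; omega) (by push_cast; omega)
    simp only [h1, h2, h3', if_neg, not_false_iff]
    have hh1 : ((lines.length : Int) + 3 - 1) / 3 = (((b+1) : Nat) : Int) := by push_cast; omega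
    rw [hh1, PySem.List.slice_from_natCast]
    have hh2 : (((List.drop (b+1) lines).length : Int) + 2 - 1) / 2 = ((b : Nat) : Int) := by
      simp only [List.length_drop]; omega
    rw [hh2, PySem.List.slice_to_natCast, PySem.List.slice_from_natCast, List.drop_drop,
      PySem.List.slice_natCast_add]
    rw [show (((b+1):Nat):Int) + (b:Int) = (((b+1+b):Nat):Int) by push_cast; ring]
    rw [PySem.List.slice_natCast_add]
    rw [PySem.List.slice_to_natCast]
    rw [List.take_of_length_le (l := List.drop (b + 1 + b) lines) (by simp; omega)]
    simp
  · -- r = 2 : chunks of sizes b+1, b+1, b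
    have hlen : (lines.length : Int) = 3 * (b : Int) + 2 := by exact_mod_cast hrel
    rw [show (b : Int) + 1 = (((b + 1) : Nat) : Int) by push_cast; ring]
    have h1 : PySem.List.slice lines none (some (((b+1) : Nat) : Int)) ≠ [] :=
      pv_slice_none_ne _ (by push_cast; omega) (by omega)
    have h2 : PySem.List.slice lines (some (((b+1):Nat):Int))
        (some ((((b+1):Nat):Int)+(((b+1):Nat):Int))) ≠ [] :=
      pv_slice_some_ne _ (by push_cast; omega) (by push_cast; omega) (by push_cast; omega)
    have h3' : PySem.List.slice lines (some ((((b+1):Nat):Int)+(((b+1):Nat):Int)))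
        (some ((((b+1):Nat):Int)+(((b+1):Nat):Int)+(b:Int))) ≠ [] :=
      pv_slice_some_ne _ (by push_cast; omega) (by push_cast; omega) (by push_cast; omega)
    simp only [h1, h2, h3', if_neg, not_false_iff]
    have hh1 : ((lines.length : Int) + 3 - 1) / 3 = (((b+1) : Nat) : Int) := by push_cast; omega
    rw [hh1, PySem.List.slice_from_natCast]
    have hh2 : (((List.drop (b+1) lines).length : Int) + 2 - 1) / 2 = (((b+1) : Nat) : Int) := by
      simp only [List.length_drop]; omega
    rw [hh2, PySem.List.slice_to_natCast, PySem.List.slice_from_natCast, List.drop_drop,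
      PySem.List.slice_natCast_add]
    rw [show (((b+1):Nat):Int) + (((b+1):Nat):Int) = (((b+1+(b+1)):Nat):Int) by push_cast; ring]
    rw [PySem.List.slice_natCast_add]
    rw [PySem.List.slice_to_natCast]
    rw [List.take_of_length_le (l := List.drop (b + 1 + (b + 1)) lines) (by simp; omega)]
    simp

lemma pvA_eq_chunk (lines : List String) (h : lines ≠ []) :
    pvA lines = pvChunk lines (min 3 lines.length) := by
  match lines with
  | [] => exact absurd rfl h
  | [a] =>
    simp [pvA, pvChunk, PySem.List.pyRange, PySem.Int.floordiv, PySem.Int.mod, PySem.List.slice]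
  | [a, b] =>
    simp [pvA, pvChunk, PySem.List.pyRange, PySem.Int.floordiv, PySem.Int.mod, PySem.List.slice,
      List.range_succ, PySem.List.clampIdx]
  | a :: b :: c :: rest =>
    have hm : min 3 (a :: b :: c :: rest).length = 3 := by simp
    rw [hm]
    exact pv_core _ (by simp)

-- ===== VERDICT (by name: the statement is the Claim_ definition above) =====
theorem split_into_three_chunks_py_spec : Claim_equal_split_into_three_chunks_py := by
  intro text _
  unfold Spec_split_into_three_chunks_py
  have hA : split_into_three_chunks_py text =
      if (pvLines text).isEmpty then [] else pvA (pvLines text) := rfl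
  have hB : split_into_three_chunks_py_alt text =
      if (pvLines text).isEmpty then [] else pvChunk (pvLines text) (min 3 (pvLines text).length) := rfl
  rw [hA, hB]
  by_cases h : (pvLines text).isEmpty
  · simp [h]
  · simp only [h]
    exact pvA_eq_chunk _ (by simpa [List.isEmpty_iff] using h)
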